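-- pv_equiv track=rewrite | github.com/Lealwbs/alg1 | tp2/tests/test_generator.py | calcular_altura_triangulo
-- ===== SOURCE A (Python) =====
-- def calcular_altura_triangulo(pilhas):
--     """Calcula a altura máxima do triângulo isósceles usando algoritmo guloso"""
--     pilhas_ordenadas = sorted(pilhas, reverse=True)
--     altura = 0
--
--     while True:
--         largura_necessaria = 2 * altura + 1
--         if len(pilhas_ordenadas) < largura_necessaria:
--             break
--
--         # Verifica se há blocos suficientes para a próxima linha
--         blocos_necessarios = sum(range(1, largura_necessaria + 1))
--         blocos_disponiveis = sum(pilhas_ordenadas[:largura_necessaria])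
--
--         if blocos_disponiveis >= blocos_necessarios:
--             altura += 1
--         else:
--             break
--
--     return altura
-- ===== SOURCE B (Python) =====
-- def calcular_altura_triangulo(pilhas):
--     """Altura maxima do triangulo: uma unica passada com soma acumulada e numero triangular em forma fechada."""
--     ordenadas = sorted(pilhas, reverse=True)
--     altura = 0
--     total = 0
--     for i, bloco in enumerate(ordenadas, 1):
--         total += bloco
--         if i % 2 == 1:
--             if total >= i * (i + 1) // 2:
--                 altura += 1
--             else:
--                 break
--     return altura
-- ===== Notes on version B (the rewrite author's own statement) =====
-- stated objective: faster
-- what changed: B replaces A's while-loop that re-slices and re-sums both the top of the sorted list and range(1,w+1) at every height with a single pass over the sorted list keeping a running block total and comparing it to the closed-form triangular number i*(i+1)//2 at each odd width.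
import Mathlib
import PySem

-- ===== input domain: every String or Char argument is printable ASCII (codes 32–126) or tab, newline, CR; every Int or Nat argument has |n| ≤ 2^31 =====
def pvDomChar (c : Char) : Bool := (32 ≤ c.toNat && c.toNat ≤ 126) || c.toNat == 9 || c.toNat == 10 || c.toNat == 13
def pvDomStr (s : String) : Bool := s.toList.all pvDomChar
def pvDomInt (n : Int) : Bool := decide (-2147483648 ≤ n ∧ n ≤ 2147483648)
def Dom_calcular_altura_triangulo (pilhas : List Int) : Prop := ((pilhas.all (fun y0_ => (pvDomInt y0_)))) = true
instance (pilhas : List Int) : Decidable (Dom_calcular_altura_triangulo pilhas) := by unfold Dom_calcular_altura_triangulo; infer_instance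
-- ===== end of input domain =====

-- B replaces A's per-height re-slicing/re-summing with one pass over the sorted list keeping a
-- running total, compared to the closed-form triangular number (objective: faster).

-- ===== PORT A =====
-- A's 'while True' loop; altura grows each iteration that continues and the loop breaks once
-- len < 2*altura+1, so length+1 fuel steps always suffice (the fuel-0 branch is unreachable).
def pvLoopA (xs : List Int) : Nat → Int → Int
  | 0, altura => altura
  | fuel+1, altura =>
      let largura := 2 * altura + 1
      if (xs.length : Int) < largura then altura
      else
        let blocos_necessarios := (PySem.List.pyRange 1 (largura + 1) 1).sum
        let blocos_disponiveis := (PySem.List.slice xs none (some largura)).sum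
        if blocos_disponiveis ≥ blocos_necessarios then pvLoopA xs fuel (altura + 1)
        else altura

def calcular_altura_triangulo (pilhas : List Int) : Int :=
  let ordenadas := PySem.List.sorted pilhas (fun x => x) true
  pvLoopA ordenadas (ordenadas.length + 1) 0

-- ===== PORT B =====
-- the for-loop of Source B: state (altura, total), counter i from 1; 'break' = return altura
def pvLoopB : List Int → Int → Int → Int → Int
  | [], altura, _, _ => altura
  | bloco :: resto, altura, total, i =>
      let total' := total + bloco
      if PySem.Int.mod i 2 == 1 then
        if total' ≥ PySem.Int.floordiv (i * (i + 1)) 2 then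
          pvLoopB resto (altura + 1) total' (i + 1)
        else altura
      else pvLoopB resto altura total' (i + 1)

def calcular_altura_triangulo_alt (pilhas : List Int) : Int :=
  let ordenadas := PySem.List.sorted pilhas (fun x => x) true
  pvLoopB ordenadas 0 0 1

-- ===== PRECONDITION & SPEC =====
def Spec_calcular_altura_triangulo (pilhas : List Int) (out : Int) : Prop := out = calcular_altura_triangulo_alt pilhas
instance (pilhas : List Int) (out : Int) : Decidable (Spec_calcular_altura_triangulo pilhas out) := by unfold Spec_calcular_altura_triangulo; infer_instance

-- ===== CLAIM (what is proved, stated in full; the proofs are below) =====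
def Claim_equal_calcular_altura_triangulo : Prop := ∀ (pilhas : List Int), Dom_calcular_altura_triangulo pilhas → Spec_calcular_altura_triangulo pilhas (calcular_altura_triangulo pilhas)

-- ===== LEMMAS AND PROOFS =====

-- sum(range(1, m+1)) doubled is m*(m+1)
lemma two_mul_sum_pyRange (m : Nat) :
    2 * (PySem.List.pyRange 1 ((m : Int) + 1) 1).sum = (m : Int) * ((m : Int) + 1) := by
  induction m with
  | zero => decide
  | succ k ih =>
      push_cast
      rw [show ((k : Int) + 1 + 1) = ((k : Int) + 1) + 1 by ring,
        PySem.List.pyRange_one_succ_right (show (1:Int) ≤ (k:Int)+1 by omega)]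
      rw [List.sum_append]
      simp only [List.sum_cons, List.sum_nil]
      nlinarith [ih]

-- A's per-iteration needed-blocks sum equals B's closed-form triangular number
lemma need_eq (h : Nat) :
    (PySem.List.pyRange 1 (2 * (h : Int) + 1 + 1) 1).sum
      = PySem.Int.floordiv ((2 * (h : Int) + 1) * (2 * (h : Int) + 1 + 1)) 2 := by
  have h2 := two_mul_sum_pyRange (2 * h + 1)
  push_cast at h2
  have hr : ((2:Int) * (h : Int) + 1 + 1) = (2 * (h : Int) + 1) + 1 := by ring
  rw [hr] at *
  rw [PySem.Int.floordiv_eq_ediv_of_pos (by norm_num)]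
  omega

-- the two loops agree from any height h reached with the invariant state
lemma loop_eq (ys : List Int) : ∀ (fuel h : Nat),
    2 * h ≤ ys.length → ys.length + 1 ≤ fuel + 2 * h →
    pvLoopA ys fuel (h : Int) =
      pvLoopB (ys.drop (2 * h)) (h : Int) ((ys.take (2 * h)).sum) (2 * (h : Int) + 1) := by
  intro fuel
  induction fuel with
  | zero => intro h h1 h2; omega
  | succ f ih =>
      intro h h1 h2
      rw [pvLoopA]
      by_cases hlen : (ys.length : Int) < 2 * (h : Int) + 1
      · rw [if_pos hlen, List.drop_eq_nil_iff.mpr (by omega), pvLoopB]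
      · rw [if_neg hlen]
        have hlt : 2 * h < ys.length := by omega
        have hslice : PySem.List.slice ys none (some (2 * (h : Int) + 1)) = ys.take (2 * h + 1) := by
          have hc := PySem.List.slice_to_natCast ys (2 * h + 1)
          push_cast at hc
          exact hc
        have htake : (ys.take (2 * h + 1)).sum = (ys.take (2 * h)).sum + ys[2 * h] := by
          rw [List.take_add_one, List.sum_append, List.getElem?_eq_getElem hlt]
          simp
        have hdrop : ys.drop (2 * h) = ys[2 * h] :: ys.drop (2 * h + 1) :=
          List.drop_eq_getElem_cons hlt
        rw [hdrop, pvLoopB]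
        have hmod : (PySem.Int.mod (2 * (h : Int) + 1) 2 == 1) = true := by
          rw [PySem.Int.mod_eq_emod_of_pos (by norm_num)]
          simp
        rw [hmod]
        simp only [if_true, hslice, need_eq h]
        rw [← htake]
        by_cases hcond : (ys.take (2 * h + 1)).sum ≥ PySem.Int.floordiv ((2 * (h : Int) + 1) * (2 * (h : Int) + 1 + 1)) 2
        · rw [if_pos hcond, if_pos hcond]
          by_cases hlast : ys.length = 2 * h + 1
          · -- list exhausted after this element: B returns altura+1, A breaks at the next check
            rw [List.drop_eq_nil_iff.mpr (by omega), pvLoopB]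
            cases f with
            | zero => omega
            | succ f' =>
                rw [pvLoopA]
                rw [if_pos (by omega)]
          · have hlt2 : 2 * h + 1 < ys.length := by omega
            rw [List.drop_eq_getElem_cons hlt2, pvLoopB]
            have hmod2 : (PySem.Int.mod (2 * (h : Int) + 1 + 1) 2 == 1) = false := by
              rw [PySem.Int.mod_eq_emod_of_pos (by norm_num)]
              simp
              omega
            rw [hmod2]
            simp only [if_false, Bool.false_eq_true]
            have := ih (h + 1) (by omega) (by omega)
            have hcast : ((h : Int) + 1) = ((h + 1 : Nat) : Int) := by push_cast; ring
            have htake2 : (ys.take (2 * h + 1)).sum + ys[2 * h + 1] = (ys.take (2 * (h + 1))).sum := by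
              have e : ys.take (2 * (h + 1)) = ys.take (2 * h + 1) ++ [ys[2 * h + 1]] := by
                rw [show 2 * (h + 1) = (2 * h + 1) + 1 by ring, List.take_add_one,
                  List.getElem?_eq_getElem hlt2]
                rfl
              rw [e, List.sum_append, List.sum_cons, List.sum_nil, add_zero]
            rw [htake2, hcast]
            rw [show (2 * (h : Int) + 1 + 1 + 1) = 2 * ((h + 1 : Nat) : Int) + 1 by push_cast; ring,
              show 2 * h + 1 + 1 = 2 * (h + 1) by ring]
            exact this
        · rw [if_neg hcond, if_neg hcond]

-- ===== VERDICT (by name: the statement is the Claim_ definition above) =====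
theorem calcular_altura_triangulo_spec : Claim_equal_calcular_altura_triangulo := by
  intro pilhas _
  unfold Spec_calcular_altura_triangulo calcular_altura_triangulo calcular_altura_triangulo_alt
  have h := loop_eq (PySem.List.sorted pilhas (fun x => x) true)
    ((PySem.List.sorted pilhas (fun x => x) true).length + 1) 0 (by omega) (by omega)
  simpa using h
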